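-- pv_equiv track=rewrite | github.com/Runningbird20/Project-2 | apply/views.py | _benefits_score_from_company_perks
-- ===== SOURCE A (Python) =====
-- def _benefits_score_from_company_perks(company_perks_text):
--     perks_text = (company_perks_text or "").strip()
--     if not perks_text:
--         return 5
--     tokens = [
--         token.strip()
--         for token in perks_text.replace("\n", ",").replace(";", ",").split(",")
--         if token.strip()
--     ]
--     if not tokens:
--         return 5
--     return min(10, max(6, len(tokens)))
-- ===== SOURCE B (Python) =====
-- def _benefits_score_from_company_perks(company_perks_text):
--     perks_text = (company_perks_text or "").strip()
--     if not perks_text: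
--         return 5
--     count = 0
--     has_content = False
--     for ch in perks_text:
--         if ch in ",;\n":
--             if has_content:
--                 count += 1
--             has_content = False
--         elif not ch.isspace():
--             has_content = True
--     if has_content:
--         count += 1
--     if count == 0:
--         return 5
--     return min(10, max(6, count))
-- ===== Notes on version B (the rewrite author's own statement) =====
-- stated objective: alternative
-- what changed: Replaces the replace/replace/split/strip-each-token list pipeline with a single character scan that counts non-blank segments between comma, semicolon and newline delimiters without building any intermediate strings or lists.
import Mathlib
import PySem

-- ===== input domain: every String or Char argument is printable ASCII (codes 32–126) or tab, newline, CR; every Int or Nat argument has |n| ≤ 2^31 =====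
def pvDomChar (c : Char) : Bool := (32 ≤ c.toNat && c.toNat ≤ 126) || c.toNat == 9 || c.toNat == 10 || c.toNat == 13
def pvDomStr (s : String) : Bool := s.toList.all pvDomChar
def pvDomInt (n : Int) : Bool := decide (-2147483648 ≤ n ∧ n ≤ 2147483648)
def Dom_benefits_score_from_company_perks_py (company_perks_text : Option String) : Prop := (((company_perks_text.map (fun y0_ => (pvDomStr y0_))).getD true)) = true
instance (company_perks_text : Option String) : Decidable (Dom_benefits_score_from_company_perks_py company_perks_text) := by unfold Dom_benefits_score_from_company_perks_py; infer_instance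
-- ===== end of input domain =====

-- B replaces A's replace/replace/split/strip-per-token pipeline by a single character scan
-- counting non-blank segments between ',', ';', '\n' (alternative decomposition, same cost).


-- ===== PORT A =====
def benefits_score_from_company_perks_py (company_perks_text : Option String) : Int :=
  let perks_text := PySem.Str.strip (company_perks_text.getD "")
  if perks_text = "" then 5
  else
    let tokens :=
      (((PySem.Str.split? (PySem.Str.replace (PySem.Str.replace perks_text "\n" ",") ";" ",") ",").getD []).map
          PySem.Str.strip).filter (fun t => t ≠ "")
    if tokens = [] then 5
    else min 10 (max 6 (tokens.length : Int))

-- ===== PORT B =====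
def benefits_score_from_company_perks_py_alt (company_perks_text : Option String) : Int :=
  let perks_text := PySem.Str.strip (company_perks_text.getD "")
  if perks_text = "" then 5
  else
    let st := perks_text.toList.foldl
      (fun (st : Int × Bool) ch =>
        if ch = ',' ∨ ch = ';' ∨ ch = '\n' then
          (if st.2 then st.1 + 1 else st.1, false)
        else if PySem.Chars.isspace ch then st
        else (st.1, true)) ((0 : Int), false)
    let count := if st.2 then st.1 + 1 else st.1
    if count = 0 then 5
    else min 10 (max 6 count)

-- ===== PRECONDITION & SPEC =====
def Spec_benefits_score_from_company_perks_py (company_perks_text : Option String) (out : Int) : Prop := out = benefits_score_from_company_perks_py_alt company_perks_text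
instance (company_perks_text : Option String) (out : Int) : Decidable (Spec_benefits_score_from_company_perks_py company_perks_text out) := by unfold Spec_benefits_score_from_company_perks_py; infer_instance

-- ===== CLAIM (what is proved, stated in full; the proofs are below) =====
def Claim_equal_benefits_score_from_company_perks_py : Prop := ∀ (company_perks_text : Option String), Dom_benefits_score_from_company_perks_py company_perks_text → Spec_benefits_score_from_company_perks_py company_perks_text (benefits_score_from_company_perks_py company_perks_text)

-- ===== LEMMAS AND PROOFS =====

-- replace with a single-char pattern is a map
theorem replace_go_single (a b : Char) :
    ∀ (fuel : Nat) (cs acc : List Char), cs.length ≤ fuel →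
      PySem.Chars.replace.go [a] [b] fuel cs acc =
        acc.reverse ++ cs.map (fun c => if c = a then b else c) := by
  intro fuel
  induction fuel with
  | zero => intro cs acc h; cases cs with
    | nil => simp [PySem.Chars.replace.go]
    | cons x t => simp at h
  | succ n ih =>
    intro cs acc h
    cases cs with
    | nil => simp [PySem.Chars.replace.go]
    | cons x t =>
      simp only [List.length_cons, Nat.succ_le_succ_iff] at h
      by_cases hx : x = a
      · simp [PySem.Chars.replace.go, hx, List.isPrefixOf, ih t _ h]
      · have hx' : ¬ a = x := fun e => hx e.symm
        simp only [PySem.Chars.replace.go, List.isPrefixOf, Bool.and_true]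
        rw [if_neg (by simp [hx']), ih t _ h]
        simp [if_neg hx]

theorem replace_single (cs : List Char) (a b : Char) :
    PySem.Chars.replace cs [a] [b] = cs.map (fun c => if c = a then b else c) := by
  simpa using replace_go_single a b cs.length cs [] le_rfl

-- split on a single char, recursively
def splitC (sep : Char) : List Char → List (List Char)
  | [] => [[]]
  | x :: t => if x = sep then [] :: splitC sep t else (splitC sep t).modifyHead (x :: ·)

theorem modifyHead_id' (l : List (List Char)) : List.modifyHead (fun x => x) l = l := by
  cases l <;> simp

theorem splitC_ne_nil (sep : Char) (cs : List Char) : splitC sep cs ≠ [] := by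
  cases cs with
  | nil => simp [splitC]
  | cons x t =>
    simp only [splitC]
    split_ifs <;> simp [List.modifyHead]
    cases h : splitC sep t with
    | nil => exact absurd h (splitC_ne_nil sep t)
    | cons a l => simp

theorem splitOn_go_single (sep : Char) :
    ∀ (fuel : Nat) (cs cur : List Char) (acc : List (List Char)), cs.length < fuel →
      PySem.Chars.splitOn.go [sep] fuel cs cur acc =
        acc.reverse ++ (splitC sep cs).modifyHead (cur.reverse ++ ·) := by
  intro fuel
  induction fuel with
  | zero => intro cs cur acc h; exact absurd h (Nat.not_lt_zero _)
  | succ n ih =>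
    intro cs cur acc h
    cases cs with
    | nil => simp [PySem.Chars.splitOn.go, splitC]
    | cons x t =>
      simp only [List.length_cons, Nat.succ_lt_succ_iff] at h
      by_cases hx : x = sep
      · subst hx
        simp only [PySem.Chars.splitOn.go, List.isPrefixOf, BEq.rfl, Bool.and_self,
          if_pos, List.length_cons, List.length_nil, List.drop_succ_cons, List.drop_zero]
        rw [ih t [] _ h]
        simp [splitC, modifyHead_id']
      · have hx' : ¬ sep = x := fun e => hx e.symm
        simp only [PySem.Chars.splitOn.go, List.isPrefixOf, Bool.and_true]
        rw [if_neg (by simp [hx']), ih t (x :: cur) acc h]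
        cases hs : splitC sep t with
        | nil => exact absurd hs (splitC_ne_nil sep t)
        | cons s ss => simp [splitC, if_neg hx, hs]

theorem splitOn_single (cs : List Char) (sep : Char) :
    PySem.Chars.splitOn cs [sep] = splitC sep cs := by
  have := splitOn_go_single sep (cs.length + 1) cs [] [] (by omega)
  simpa [PySem.Chars.splitOn, modifyHead_id'] using this

-- splitting the \n/;→, image on ',' = splitting the original on any of the three delimiters
def isDelim (c : Char) : Bool := c = ',' ∨ c = ';' ∨ c = '\n'

def splitD : List Char → List (List Char)
  | [] => [[]]
  | x :: t => if isDelim x then [] :: splitD t else (splitD t).modifyHead (x :: ·)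

theorem splitC_map_sub (cs : List Char) :
    splitC ','
      ((cs.map (fun c => if c = '\n' then ',' else c)).map (fun c => if c = ';' then ',' else c)) =
      splitD cs := by
  induction cs with
  | nil => rfl
  | cons x t ih =>
    simp only [List.map_cons, splitC, splitD, isDelim]
    by_cases h1 : x = ',' <;> by_cases h2 : x = ';' <;> by_cases h3 : x = '\n' <;>
      simp_all [splitC]

theorem splitD_ne_nil (cs : List Char) : splitD cs ≠ [] := by
  cases cs with
  | nil => simp [splitD]
  | cons x t =>
    simp only [splitD]
    split_ifs
    · simp
    · cases h : splitD t with
      | nil => exact absurd h (splitD_ne_nil t)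
      | cons a l => simp

-- a token survives strip iff it contains a non-space char
theorem strip_eq_nil_iff (t : List Char) :
    PySem.Chars.strip t = [] ↔ t.all PySem.Chars.isspace := by
  simp only [PySem.Chars.strip, PySem.Chars.rstrip, PySem.Chars.lstrip,
    List.reverse_eq_nil_iff, List.dropWhile_eq_nil_iff, List.mem_reverse]
  constructor
  · intro h
    rw [← List.takeWhile_append_dropWhile (p := PySem.Chars.isspace) (l := t), List.all_append,
      Bool.and_eq_true]
    refine And.intro ?_ ?_
    · exact List.all_eq_true.mpr (fun c hc => List.mem_takeWhile_imp hc)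
    · exact List.all_eq_true.mpr h
  · intro h c hc
    exact (List.all_eq_true.mp h) c (List.dropWhile_subset _ hc)

-- segment-count with pending flag (B's scan, recursively)
def nTok (hc : Bool) : List Char → Nat
  | [] => if hc then 1 else 0
  | x :: t =>
    if isDelim x then (if hc then 1 else 0) + nTok false t
    else if PySem.Chars.isspace x then nTok hc t
    else nTok true t

def hasContent (t : List Char) : Bool := t.any (fun c => ! PySem.Chars.isspace c)

theorem nTok_eq_countP (cs : List Char) (hc : Bool) :
    nTok hc cs = (splitD cs).countP hasContent +
      (if hc && ! hasContent ((splitD cs).headI) then 1 else 0) := by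
  induction cs generalizing hc with
  | nil => cases hc <;> simp [nTok, splitD, hasContent]
  | cons x t ih =>
    by_cases hd : isDelim x
    · simp only [nTok, splitD, if_pos hd]
      rw [ih false]
      cases hc <;> simp [List.countP_cons, hasContent] <;> omega
    · simp only [nTok, splitD, if_neg hd]
      cases hs : splitD t with
      | nil => exact absurd hs (splitD_ne_nil t)
      | cons s ss =>
        by_cases hsp : PySem.Chars.isspace x = true
        · have hx : hasContent (x :: s) = hasContent s := by
            simp [hasContent, hsp]
          rw [if_pos hsp, ih hc, hs]
          simp [List.modifyHead, List.countP_cons, hx]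
        · have hx : hasContent (x :: s) = true := by
            simp only [hasContent, List.any_cons, Bool.or_eq_true]
            exact Or.inl (by simp [hsp])
          rw [if_neg hsp, ih true, hs]
          simp only [List.modifyHead, List.countP_cons, hx, List.headI_cons, Bool.true_and,
            Bool.not_true, Bool.and_false, if_pos, if_true]
          by_cases hcs : hasContent s = true <;> cases hc <;> simp [hcs] <;> omega

-- the foldl in B computes nTok
theorem foldl_scan (cs : List Char) (count : Int) (hc : Bool) :
    (if (cs.foldl
      (fun (st : Int × Bool) ch =>
        if ch = ',' ∨ ch = ';' ∨ ch = '\n' then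
          (if st.2 then st.1 + 1 else st.1, false)
        else if PySem.Chars.isspace ch then st
        else (st.1, true)) (count, hc)).2 then
      (cs.foldl
      (fun (st : Int × Bool) ch =>
        if ch = ',' ∨ ch = ';' ∨ ch = '\n' then
          (if st.2 then st.1 + 1 else st.1, false)
        else if PySem.Chars.isspace ch then st
        else (st.1, true)) (count, hc)).1 + 1
    else
      (cs.foldl
      (fun (st : Int × Bool) ch =>
        if ch = ',' ∨ ch = ';' ∨ ch = '\n' then
          (if st.2 then st.1 + 1 else st.1, false)
        else if PySem.Chars.isspace ch then st
        else (st.1, true)) (count, hc)).1) = count + nTok hc cs := by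
  induction cs generalizing count hc with
  | nil => cases hc <;> simp [nTok]
  | cons x t ih =>
    simp only [List.foldl_cons, nTok]
    by_cases hd : isDelim x
    · have hd' : x = ',' ∨ x = ';' ∨ x = '\n' := by
        simpa [isDelim] using hd
      rw [if_pos hd', if_pos hd]
      cases hc <;> simp only [ih] <;> push_cast <;> ring
    · have hd' : ¬ (x = ',' ∨ x = ';' ∨ x = '\n') := by
        simpa [isDelim] using hd
      rw [if_neg hd', if_neg hd]
      by_cases hsp : PySem.Chars.isspace x = true
      · rw [if_pos hsp, if_pos hsp]; exact ih count hc
      · rw [if_neg hsp, if_neg hsp]; exact ih count true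

-- A's token count equals the countP over splitD
theorem strip_ne_nil_iff (t : List Char) :
    (PySem.Chars.strip t ≠ []) ↔ hasContent t = true := by
  rw [Ne, strip_eq_nil_iff, hasContent]
  simp only [List.any_eq_true, Bool.not_eq_true', List.all_eq_true]
  push_neg
  simp [Bool.not_eq_true]

theorem tokens_length (cs : List Char) :
    (((splitD cs).map PySem.Chars.strip).filter (fun t => t ≠ [])).length =
      (splitD cs).countP hasContent := by
  rw [← List.countP_eq_length_filter, List.countP_map]
  apply List.countP_congr
  intro t _
  simp only [Function.comp_apply]
  have hiff := strip_ne_nil_iff t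
  by_cases hcontent : hasContent t = true
  · simp [hcontent, hiff.mpr hcontent]
  · simp only [Bool.not_eq_true] at hcontent
    have hnil : PySem.Chars.strip t = [] := by
      by_contra hne
      exact absurd (hiff.mp hne) (by simp [hcontent])
    simp [hnil, hcontent]

-- ===== VERDICT (by name: the statement is the Claim_ definition above) =====
theorem main_eq (s : String) :
    (if s = "" then (5 : Int)
     else
       if ((((PySem.Str.split? (PySem.Str.replace (PySem.Str.replace s "\n" ",") ";" ",")
              ",").getD []).map PySem.Str.strip).filter (fun t => t ≠ "")) = [] then 5
       else min 10 (max 6 (((((PySem.Str.split? (PySem.Str.replace (PySem.Str.replace s "\n" ",")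
              ";" ",") ",").getD []).map PySem.Str.strip).filter (fun t => t ≠ "")).length : Int)))
    =
    (if s = "" then (5 : Int)
     else
       if (if (s.toList.foldl
            (fun (st : Int × Bool) ch =>
              if ch = ',' ∨ ch = ';' ∨ ch = '\n' then
                (if st.2 then st.1 + 1 else st.1, false)
              else if PySem.Chars.isspace ch then st
              else (st.1, true)) ((0 : Int), false)).2 then
            (s.toList.foldl
            (fun (st : Int × Bool) ch =>
              if ch = ',' ∨ ch = ';' ∨ ch = '\n' then
                (if st.2 then st.1 + 1 else st.1, false)
              else if PySem.Chars.isspace ch then st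
              else (st.1, true)) ((0 : Int), false)).1 + 1
          else
            (s.toList.foldl
            (fun (st : Int × Bool) ch =>
              if ch = ',' ∨ ch = ';' ∨ ch = '\n' then
                (if st.2 then st.1 + 1 else st.1, false)
              else if PySem.Chars.isspace ch then st
              else (st.1, true)) ((0 : Int), false)).1) = 0 then 5
       else min 10 (max 6 (if (s.toList.foldl
            (fun (st : Int × Bool) ch =>
              if ch = ',' ∨ ch = ';' ∨ ch = '\n' then
                (if st.2 then st.1 + 1 else st.1, false)
              else if PySem.Chars.isspace ch then st
              else (st.1, true)) ((0 : Int), false)).2 then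
            (s.toList.foldl
            (fun (st : Int × Bool) ch =>
              if ch = ',' ∨ ch = ';' ∨ ch = '\n' then
                (if st.2 then st.1 + 1 else st.1, false)
              else if PySem.Chars.isspace ch then st
              else (st.1, true)) ((0 : Int), false)).1 + 1
          else
            (s.toList.foldl
            (fun (st : Int × Bool) ch =>
              if ch = ',' ∨ ch = ';' ∨ ch = '\n' then
                (if st.2 then st.1 + 1 else st.1, false)
              else if PySem.Chars.isspace ch then st
              else (st.1, true)) ((0 : Int), false)).1))) := by
  by_cases hs : s = ""
  · simp [hs]
  · rw [if_neg hs, if_neg hs]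
    have hsplit : PySem.Str.split? (PySem.Str.replace (PySem.Str.replace s "\n" ",") ";" ",") ","
        = some ((splitD s.toList).map String.ofList) := by
      have h1 : (",".toList : List Char) = [','] := rfl
      have h2 : ("\n".toList : List Char) = ['\n'] := rfl
      have h3 : (";".toList : List Char) = [';'] := rfl
      simp only [PySem.Str.split?, PySem.Chars.split?, PySem.Str.toList_replace, h1, h2, h3,
        List.isEmpty_cons, Bool.false_eq_true, if_false, replace_single, splitOn_single,
        splitC_map_sub, Option.map_some]
    have hstripcomp : ∀ t : List Char,
        PySem.Str.strip (String.ofList t) = String.ofList (PySem.Chars.strip t) := by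
      intro t; simp [PySem.Str.strip]
    have htok : ∀ (parts : List (List Char)),
        (((parts.map String.ofList).map PySem.Str.strip).filter (fun t => t ≠ "")) =
          (((parts.map PySem.Chars.strip).filter (fun t => t ≠ [])).map String.ofList) := by
      intro parts
      induction parts with
      | nil => rfl
      | cons p ps ih =>
        simp only [List.map_cons, List.filter_cons, hstripcomp p, ih]
        by_cases hp : PySem.Chars.strip p = []
        · rw [hp]
          simp
        · have : String.ofList (PySem.Chars.strip p) ≠ "" := by
            simpa [String.ext_iff] using hp
          simp [hp, this]
    rw [hsplit, Option.getD_some, htok, foldl_scan, nTok_eq_countP]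
    simp only [Bool.false_and, Bool.false_eq_true, if_false, add_zero, zero_add]
    by_cases hzero : (splitD s.toList).countP hasContent = 0
    · have hFL : (((splitD s.toList).map PySem.Chars.strip).filter (fun t => t ≠ [])) = [] := by
        rw [← List.length_eq_zero_iff, tokens_length]
        exact hzero
      rw [hFL]
      simp [hzero]
    · have hFL : (((splitD s.toList).map PySem.Chars.strip).filter (fun t => t ≠ [])) ≠ [] := by
        intro hcon
        apply hzero
        rw [← tokens_length, hcon]
        rfl
      have hmap : ((((splitD s.toList).map PySem.Chars.strip).filter
          (fun t => t ≠ [])).map String.ofList) ≠ [] := by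
        intro hcon
        exact hFL (List.map_eq_nil_iff.mp hcon)
      rw [if_neg hmap, List.length_map, tokens_length,
        if_neg (show ¬((((splitD s.toList).countP hasContent : Nat) : Int) = 0) by
          exact_mod_cast hzero)]

-- ===== VERDICT (by name: the statement is the Claim_ definition above) =====
theorem benefits_score_from_company_perks_py_spec : Claim_equal_benefits_score_from_company_perks_py := by
  intro o _
  unfold Spec_benefits_score_from_company_perks_py
  unfold benefits_score_from_company_perks_py benefits_score_from_company_perks_py_alt
  exact main_eq (PySem.Str.strip (o.getD ""))
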